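-- pv_equiv track=rewrite | github.com/MrBrantCode/unitest_baseline | mut_generate/mist_train_taco/taco_7988/solution.py | count_crying_emoticons
-- ===== SOURCE A (Python) =====
-- def count_crying_emoticons(message: str) -> int:
--     MOD = 10**9 + 7
--     c = 0
--     rc = 0
--     i = message.find(';')
--     if i == -1:
--         return 0
--     semcols_seen = 0
--
--     while i < len(message):
--         if message[i] == '_':
--             rc = (rc * 2 + semcols_seen) % MOD
--         else:
--             semcols_seen += 1
--             c = (c + rc) % MOD
--         i += 1
--
--     return c
-- ===== SOURCE B (Python) =====
-- def count_crying_emoticons(message: str) -> int: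
--     MOD = 10**9 + 7
--     i = message.find(';')
--     if i == -1:
--         return 0
--     tail = message[i:]
--     sems = []          # indices (in tail) of the non-underscore chars: each can serve as an eye
--     pref = [0]         # pref[j] = number of underscores among tail[:j]
--     for j, ch in enumerate(tail):
--         if ch != '_':
--             sems.append(j)
--         pref.append(pref[-1] + (1 if ch == '_' else 0))
--     ans = 0
--     for b in range(len(sems)):
--         for a in range(b):
--             u = pref[sems[b]] - pref[sems[a]]
--             ans = (ans + pow(2, u, MOD) - 1) % MOD
--     return ans
-- ===== Notes on version B (the rewrite author's own statement) =====
-- stated objective: alternative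
-- what changed: Replaces A's single-pass forward recurrence (doubling accumulator rc plus running count) by an explicitly combinatorial computation: collect the indices of all non-underscore characters from the first ';' on, build a prefix count of underscores, and sum (2^underscores_between - 1) mod 1e9+7 over all ordered pairs of those indices.
import Mathlib
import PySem

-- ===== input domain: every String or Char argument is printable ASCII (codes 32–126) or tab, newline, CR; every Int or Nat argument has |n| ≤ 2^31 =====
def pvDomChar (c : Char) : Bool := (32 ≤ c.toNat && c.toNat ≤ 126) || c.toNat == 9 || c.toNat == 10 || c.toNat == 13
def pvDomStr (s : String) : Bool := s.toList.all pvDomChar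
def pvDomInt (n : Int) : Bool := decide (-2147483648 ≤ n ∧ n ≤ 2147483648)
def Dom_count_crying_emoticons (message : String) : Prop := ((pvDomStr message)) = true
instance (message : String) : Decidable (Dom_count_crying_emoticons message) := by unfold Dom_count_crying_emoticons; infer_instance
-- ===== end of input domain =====

-- B replaces A's forward doubling recurrence by an explicit pairwise sum of (2^underscores - 1)
-- over all ordered pairs of non-underscore positions after the first ';' (alternative decomposition, same results).

-- ===== PORT A =====
-- one iteration of A's while-loop body on the state (c, rc, semcols_seen)
def aStep (s : Int × Int × Int) (ch : Char) : Int × Int × Int :=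
  if ch = '_' then (s.1, PySem.Int.mod (s.2.1 * 2 + s.2.2) 1000000007, s.2.2)
  else (PySem.Int.mod (s.1 + s.2.1) 1000000007, s.2.1, s.2.2 + 1)

def count_crying_emoticons (message : String) : Int :=
  let i := PySem.Str.find message ";"
  if i = -1 then 0
  else
    -- 'while i < len(message): … i += 1' reading message[i] (always in range) as a fold over range(i, len)
    ((PySem.List.pyRange i (PySem.List.len message.toList) 1).foldl
        (fun s j => aStep s (PySem.List.pyGetD message.toList j ' '))
        ((0 : Int), (0 : Int), (0 : Int))).1

-- ===== PORT B =====
-- Source B's first loop body: append j to sems when ch ≠ '_', extend pref by pref[-1] + (ch == '_')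
def bBuild (s : List Int × List Int) (p : Int × Char) : List Int × List Int :=
  (if p.2 ≠ '_' then s.1 ++ [p.1] else s.1,
   s.2 ++ [PySem.List.pyGetD s.2 (-1) 0 + (if p.2 = '_' then (1 : Int) else 0)])

-- Source B's nested pair loop (indices always in range; pyGetD is the total form of the lookup)
def bLoop (sems pref : List Int) : Int :=
  (PySem.List.pyRange 0 (PySem.List.len sems) 1).foldl
    (fun ans b =>
      (PySem.List.pyRange 0 b 1).foldl
        (fun ans a =>
          PySem.Int.mod (ans + PySem.Int.powMod 2
            (PySem.List.pyGetD pref (PySem.List.pyGetD sems b 0) 0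
              - PySem.List.pyGetD pref (PySem.List.pyGetD sems a 0) 0).toNat 1000000007 - 1)
            1000000007) ans) 0

def count_crying_emoticons_alt (message : String) : Int :=
  let i := PySem.Str.find message ";"
  if i = -1 then 0
  else
    let tail := PySem.List.slice message.toList (some i) none
    let sp := (PySem.List.enumerate tail 0).foldl bBuild ([], [0])
    bLoop sp.1 sp.2

-- ===== PRECONDITION & SPEC =====
def Spec_count_crying_emoticons (message : String) (out : Int) : Prop := out = count_crying_emoticons_alt message
instance (message : String) (out : Int) : Decidable (Spec_count_crying_emoticons message out) := by unfold Spec_count_crying_emoticons; infer_instance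

-- ===== CLAIM (what is proved, stated in full; the proofs are below) =====
def Claim_equal_count_crying_emoticons : Prop := ∀ (message : String), Dom_count_crying_emoticons message → Spec_count_crying_emoticons message (count_crying_emoticons message)

-- ===== LEMMAS AND PROOFS =====

-- exact (un-reduced over ℤ) version of A's loop step
def eStep (s : Int × Int × Int) (ch : Char) : Int × Int × Int :=
  if ch = '_' then (s.1, s.2.1 * 2 + s.2.2, s.2.2)
  else (s.1 + s.2.1, s.2.1, s.2.2 + 1)

def eSt (t : List Char) : Int × Int × Int := t.foldl eStep (0, 0, 0)

-- the lists Source B calls sems and pref, in closed form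
def semsL (t : List Char) : List Int :=
  ((PySem.List.enumerate t 0).filter (fun p => decide (p.2 ≠ '_'))).map (·.1)

def prefL (t : List Char) : List Int :=
  (List.range (t.length + 1)).map (fun j => ((t.take j).count '_' : Int))

-- exact value of A's rc accumulator: Σ over eye positions v of (2^(underscores after v) - 1)
def rcS (t : List Char) : Int :=
  ((semsL t).map (fun v => (2 : Int) ^ ((t.drop v.toNat).count '_') - 1)).sum

lemma eSt_snoc (t : List Char) (x : Char) : eSt (t ++ [x]) = eStep (eSt t) x := by
  simp [eSt, List.foldl_append]

lemma semsL_snoc (t : List Char) (x : Char) :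
    semsL (t ++ [x]) = semsL t ++ (if x ≠ '_' then [(t.length : Int)] else []) := by
  simp [semsL, PySem.List.enumerate_append, PySem.List.enumerate_cons, PySem.List.enumerate_nil,
    List.filter_append]
  split_ifs with h <;> simp [h]

lemma prefL_snoc (t : List Char) (x : Char) :
    prefL (t ++ [x]) = prefL t ++ [((t.count '_' : Nat) : Int) + (if x = '_' then 1 else 0)] := by
  have hlen : (t ++ [x]).length + 1 = (t.length + 1) + 1 := by simp
  rw [prefL, hlen, List.range_succ, List.map_append]
  congr 1
  · rw [prefL]
    apply List.map_congr_left
    intro j hj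
    simp at hj
    rw [List.take_append_of_le_length (by omega)]
  · simp only [List.map_cons, List.map_nil]
    rw [List.take_of_length_le (by simp)]
    simp [List.count_append]
    split_ifs with h <;> simp [h]

lemma mem_semsL (t : List Char) : ∀ v ∈ semsL t, 0 ≤ v ∧ v < (t.length : Int) := by
  intro v hv
  simp [semsL, PySem.List.mem_enumerate_iff] at hv
  obtain ⟨k, hk, hvk, -⟩ := hv
  omega

lemma prefL_length (t : List Char) : (prefL t).length = t.length + 1 := by
  simp [prefL]

lemma prefL_lookup (t : List Char) (j : Nat) (hj : j ≤ t.length) :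
    PySem.List.pyGetD (prefL t) (j : Int) 0 = ((t.take j).count '_' : Int) := by
  rw [prefL, PySem.List.pyGetD_natCast, PySem.List.getD_map_range _ _ _ _ (by omega)]

lemma getD_append_left (xs ys : List Int) (v d : Int) (h0 : 0 ≤ v) (h : v < (xs.length : Int)) :
    PySem.List.pyGetD (xs ++ ys) v d = PySem.List.pyGetD xs v d := by
  rw [PySem.List.pyGetD_eq_getElem _ _ h0 (by simp; omega),
      PySem.List.pyGetD_eq_getElem _ _ h0 h,
      List.getElem_append_left]

lemma getD_concat_length (xs : List Int) (w d : Int) :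
    PySem.List.pyGetD (xs ++ [w]) ((xs.length : Nat) : Int) d = w := by
  rw [PySem.List.pyGetD_eq_getElem _ _ (by omega) (by simp)]
  simp

lemma builder (t : List Char) :
    (PySem.List.enumerate t 0).foldl bBuild ([], [0]) = (semsL t, prefL t) := by
  induction t using List.reverseRecOn with
  | nil => simp [PySem.List.enumerate_nil, semsL, prefL]
  | append_singleton t x ih =>
    rw [PySem.List.enumerate_append, List.foldl_append, ih]
    simp only [PySem.List.enumerate_cons, PySem.List.enumerate_nil, List.foldl_cons, List.foldl_nil]
    rw [semsL_snoc, prefL_snoc]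
    unfold bBuild
    have hpl : prefL t = (List.range t.length).map (fun j => ((t.take j).count '_' : Int))
        ++ [((t.count '_' : Nat) : Int)] := by
      rw [prefL, List.range_succ, List.map_append]
      simp [List.take_of_length_le (le_refl t.length)]
    simp only [Prod.mk.injEq]
    refine ⟨?_, ?_⟩
    · split_ifs with h <;> simp_all
    · rw [show PySem.List.pyGetD (prefL t) (-1) 0 = ((t.count '_' : Nat) : Int) by
        rw [hpl, PySem.List.pyGetD_neg_one_append_singleton]]

lemma modfold {α : Type} (xs : List α) (g : α → Int) :
    ∀ a : Int, xs.foldl (fun ans x => PySem.Int.mod (ans + g x) 1000000007) (a % 1000000007)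
      = (a + (xs.map g).sum) % 1000000007 := by
  induction xs with
  | nil => simp
  | cons x xs ih =>
    intro a
    simp only [List.foldl_cons, List.map_cons, List.sum_cons]
    rw [PySem.Int.mod_eq_emod_of_pos (by norm_num)]
    have h1 : (a % 1000000007 + g x) % 1000000007 = (a + g x) % 1000000007 := by omega
    rw [h1, ih (a + g x)]
    ring_nf

lemma sum_map_emod_congr {α : Type} (xs : List α) (g h : α → Int)
    (hgh : ∀ x ∈ xs, g x % 1000000007 = h x % 1000000007) :
    (xs.map g).sum % 1000000007 = (xs.map h).sum % 1000000007 := by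
  induction xs with
  | nil => rfl
  | cons x xs ih =>
    simp only [List.map_cons, List.sum_cons]
    have h1 := hgh x (by simp)
    have h2 : (List.map g xs).sum % 1000000007 = (List.map h xs).sum % 1000000007 :=
      ih (fun y hy => hgh y (List.mem_cons_of_mem _ hy))
    omega

lemma sum_two_mul_add_one (l : List Int) (f : Int → Int) :
    (l.map (fun v => 2 * f v + 1)).sum = 2 * (l.map f).sum + l.length := by
  induction l with
  | nil => simp
  | cons y l ih => simp [ih]; ring

lemma eSt_rc_k (t : List Char) :
    (eSt t).2.1 = rcS t ∧ (eSt t).2.2 = ((semsL t).length : Int) := by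
  induction t using List.reverseRecOn with
  | nil => simp [eSt, rcS, semsL, PySem.List.enumerate_nil]
  | append_singleton t x ih =>
    obtain ⟨ihrc, ihk⟩ := ih
    rw [eSt_snoc]
    have hdrop : ∀ (c : Char), ∀ v ∈ semsL t, (t ++ [c]).drop v.toNat = t.drop v.toNat ++ [c] :=
      fun c v hv => List.drop_append_of_le_length (by have := mem_semsL t v hv; omega)
    by_cases hx : x = '_'
    · subst hx
      refine ⟨?_, ?_⟩
      · show (eStep (eSt t) '_').2.1 = rcS (t ++ ['_'])
        have hmap : (semsL (t ++ ['_'])).map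
              (fun v => (2:Int) ^ (((t ++ ['_']).drop v.toNat).count '_') - 1)
            = (semsL t).map (fun v => 2 * ((2:Int) ^ ((t.drop v.toNat).count '_') - 1) + 1) := by
          rw [semsL_snoc]
          simp only [ne_eq, not_true_eq_false, if_false, List.append_nil]
          apply List.map_congr_left
          intro v hv
          rw [hdrop '_' v hv, List.count_append]
          rw [show List.count '_' ['_'] = 1 from by decide, pow_succ]
          ring
        rw [rcS, hmap, sum_two_mul_add_one]
        simp [eStep, ihrc, ihk, rcS]
        ring
      · rw [semsL_snoc]
        simp [eStep, ihk]
    · refine ⟨?_, ?_⟩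
      · show (eStep (eSt t) x).2.1 = rcS (t ++ [x])
        rw [rcS, semsL_snoc]
        simp only [ne_eq, hx, not_false_eq_true, if_true, List.map_append, List.sum_append]
        have h0 : (((t ++ [x]).drop ((t.length : Int)).toNat).count '_') = 0 := by
          simp [List.drop_append_of_le_length (le_refl t.length), List.drop_length, hx]
        have hmap : (semsL t).map (fun v => (2:Int) ^ (((t ++ [x]).drop v.toNat).count '_') - 1)
            = (semsL t).map (fun v => (2:Int) ^ ((t.drop v.toNat).count '_') - 1) := by
          apply List.map_congr_left
          intro v hv
          rw [hdrop x v hv, List.count_append]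
          rw [show List.count '_' [x] = 0 from by simp [hx]]
          ring_nf
        rw [hmap]
        simp [eStep, hx, ihrc, rcS]
      · rw [semsL_snoc]
        simp [eStep, hx, ihk]

lemma foldA (t : List Char) : ∀ (c rc k : Int),
    t.foldl aStep (c % 1000000007, rc % 1000000007, k)
      = ((t.foldl eStep (c, rc, k)).1 % 1000000007,
         (t.foldl eStep (c, rc, k)).2.1 % 1000000007,
         (t.foldl eStep (c, rc, k)).2.2) := by
  induction t with
  | nil => intro c rc k; simp
  | cons x t ih =>
    intro c rc k
    simp only [List.foldl_cons]
    by_cases hx : x = '_'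
    · subst hx
      simp only [aStep, eStep, reduceIte]
      rw [PySem.Int.mod_eq_emod_of_pos (by norm_num)]
      rw [show (rc % 1000000007 * 2 + k) % 1000000007 = (rc * 2 + k) % 1000000007 from by omega]
      rw [ih c (rc * 2 + k) k]
    · simp only [aStep, eStep, if_neg hx]
      rw [PySem.Int.mod_eq_emod_of_pos (by norm_num)]
      rw [show (c % 1000000007 + rc % 1000000007) % 1000000007 = (c + rc) % 1000000007 from by omega]
      rw [ih (c + rc) rc (k + 1)]

lemma mainB (t : List Char) : bLoop (semsL t) (prefL t) = (eSt t).1 % 1000000007 := by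
  induction t using List.reverseRecOn with
  | nil => simp [bLoop, semsL, PySem.List.enumerate_nil, eSt, PySem.List.pyRange_one_eq_nil]
  | append_singleton t x ih =>
    -- abbreviations
    have hmemP : ∀ v ∈ semsL t, 0 ≤ v ∧ v < ((prefL t).length : Int) := by
      intro v hv
      have := mem_semsL t v hv
      have := prefL_length t
      constructor <;> omega
    -- the pref lookups used by the nested loop never see the appended entry
    have hpref' : ∀ v ∈ semsL t,
        PySem.List.pyGetD (prefL (t ++ [x])) v 0 = PySem.List.pyGetD (prefL t) v 0 := by
      intro v hv
      rw [prefL_snoc]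
      exact getD_append_left _ _ _ _ (hmemP v hv).1 (hmemP v hv).2
    -- part 1: the loop over the old sems entries is unchanged
    have hcongr : ∀ (init : Int) (sems' : List Int),
        (∀ b, 0 ≤ b → b < ((semsL t).length : Int) →
          PySem.List.pyGetD sems' b 0 = PySem.List.pyGetD (semsL t) b 0) →
        (PySem.List.pyRange 0 (((semsL t).length : Nat) : Int) 1).foldl
          (fun ans b =>
            (PySem.List.pyRange 0 b 1).foldl
              (fun ans a =>
                PySem.Int.mod (ans + PySem.Int.powMod 2
                  (PySem.List.pyGetD (prefL (t ++ [x])) (PySem.List.pyGetD sems' b 0) 0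
                    - PySem.List.pyGetD (prefL (t ++ [x])) (PySem.List.pyGetD sems' a 0) 0).toNat
                  1000000007 - 1) 1000000007) ans) init
        = (PySem.List.pyRange 0 (((semsL t).length : Nat) : Int) 1).foldl
          (fun ans b =>
            (PySem.List.pyRange 0 b 1).foldl
              (fun ans a =>
                PySem.Int.mod (ans + PySem.Int.powMod 2
                  (PySem.List.pyGetD (prefL t) (PySem.List.pyGetD (semsL t) b 0) 0
                    - PySem.List.pyGetD (prefL t) (PySem.List.pyGetD (semsL t) a 0) 0).toNat
                  1000000007 - 1) 1000000007) ans) init := by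
      intro init sems' hs
      apply PySem.List.foldl_congr_mem
      intro acc b hb
      rw [PySem.List.mem_pyRange_one] at hb
      apply PySem.List.foldl_congr_mem
      intro acc2 a ha
      rw [PySem.List.mem_pyRange_one] at ha
      have hb' := hs b hb.1 hb.2
      have ha' := hs a ha.1 (lt_trans ha.2 hb.2)
      rw [hb', ha']
      have hbmem : PySem.List.pyGetD (semsL t) b 0 ∈ semsL t := by
        have h1 := PySem.List.pyGetD_eq_getElem (semsL t) (i := b) 0 hb.1 hb.2
        rw [h1]; exact List.getElem_mem _
      have hamem : PySem.List.pyGetD (semsL t) a 0 ∈ semsL t := by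
        have h1 := PySem.List.pyGetD_eq_getElem (semsL t) (i := a) 0 ha.1 (lt_trans ha.2 hb.2)
        rw [h1]; exact List.getElem_mem _
      rw [hpref' _ hbmem, hpref' _ hamem]
    have hbl : bLoop (semsL t) (prefL t)
        = (PySem.List.pyRange 0 (((semsL t).length : Nat) : Int) 1).foldl
          (fun ans b =>
            (PySem.List.pyRange 0 b 1).foldl
              (fun ans a =>
                PySem.Int.mod (ans + PySem.Int.powMod 2
                  (PySem.List.pyGetD (prefL t) (PySem.List.pyGetD (semsL t) b 0) 0
                    - PySem.List.pyGetD (prefL t) (PySem.List.pyGetD (semsL t) a 0) 0).toNat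
                  1000000007 - 1) 1000000007) ans) 0 := by
      unfold bLoop
      simp only [PySem.List.len_eq]
    rw [eSt_snoc]
    by_cases hx : x = '_'
    · subst hx
      have hL : bLoop (semsL (t ++ ['_'])) (prefL (t ++ ['_'])) = bLoop (semsL t) (prefL t) := by
        rw [semsL_snoc]
        simp only [ne_eq, not_true_eq_false, if_false, List.append_nil]
        unfold bLoop
        simp only [PySem.List.len_eq]
        rw [hcongr 0 (semsL t) (fun b _ _ => rfl), ← hbl]
      rw [hL, ih]
      simp [eStep]
    · rw [semsL_snoc]
      simp only [ne_eq, hx, not_false_eq_true, if_true]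
      unfold bLoop
      simp only [PySem.List.len_eq]
      have hlen : (((semsL t ++ [(t.length : Int)]).length : Nat) : Int)
          = (((semsL t).length : Nat) : Int) + 1 := by simp
      rw [hlen, PySem.List.pyRange_one_succ_right (by positivity), List.foldl_append,
        List.foldl_cons, List.foldl_nil]
      rw [hcongr 0 (semsL t ++ [(t.length : Int)]) (fun b hb0 hbn =>
        getD_append_left _ _ _ _ hb0 hbn), ← hbl, ih]
      rw [show PySem.List.pyGetD (semsL t ++ [(t.length : Int)]) (((semsL t).length : Nat) : Int) 0
            = (t.length : Int) from getD_concat_length _ _ _]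
      have hcnt : PySem.List.pyGetD (prefL (t ++ [x])) ((t.length : Nat) : Int) 0
          = ((t.count '_' : Nat) : Int) := by
        rw [prefL_lookup (t ++ [x]) t.length (by simp), List.take_left]
      rw [hcnt]
      rw [PySem.List.foldl_congr_mem _ _
        (fun ans a => (fun ans v =>
          PySem.Int.mod (ans + (PySem.Int.powMod 2
            (((t.count '_' : Nat) : Int) - PySem.List.pyGetD (prefL (t ++ [x])) v 0).toNat
            1000000007 - 1)) 1000000007) ans (PySem.List.pyGetD (semsL t) a 0)) _
        (by
          intro acc a ha
          rw [PySem.List.mem_pyRange_one] at ha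
          rw [getD_append_left _ _ _ _ ha.1 ha.2]
          ring_nf)]
      rw [PySem.List.foldl_pyRange_zero_pyGetD' (semsL t) 0
        (fun ans v => PySem.Int.mod (ans + (PySem.Int.powMod 2
          (((t.count '_' : Nat) : Int) - PySem.List.pyGetD (prefL (t ++ [x])) v 0).toNat
          1000000007 - 1)) 1000000007) ((eSt t).1 % 1000000007)]
      rw [modfold (semsL t)
        (fun v => PySem.Int.powMod 2
          (((t.count '_' : Nat) : Int) - PySem.List.pyGetD (prefL (t ++ [x])) v 0).toNat
          1000000007 - 1) ((eSt t).1)]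
      have hsum : ((semsL t).map (fun v => PySem.Int.powMod 2
            (((t.count '_' : Nat) : Int) - PySem.List.pyGetD (prefL (t ++ [x])) v 0).toNat
            1000000007 - 1)).sum % 1000000007
          = ((semsL t).map (fun v => (2 : Int) ^ ((t.drop v.toNat).count '_') - 1)).sum
            % 1000000007 := by
        apply sum_map_emod_congr
        intro v hv
        have hvb := mem_semsL t v hv
        have hvcast : v = ((v.toNat : Nat) : Int) := by omega
        have hpv : PySem.List.pyGetD (prefL (t ++ [x])) v 0
            = (((t.take v.toNat).count '_' : Nat) : Int) := by
          rw [hvcast, prefL_lookup (t ++ [x]) v.toNat (by simp; omega),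
            List.take_append_of_le_length (by omega)]
          rw [Int.toNat_natCast]
        have hsplit : t.count '_' = (t.take v.toNat).count '_' + (t.drop v.toNat).count '_' := by
          conv_lhs => rw [← List.take_append_drop v.toNat t]
          rw [List.count_append]
        have he : (((t.count '_' : Nat) : Int)
            - PySem.List.pyGetD (prefL (t ++ [x])) v 0).toNat = (t.drop v.toNat).count '_' := by
          rw [hpv]; omega
        rw [he]
        show (PySem.Int.powMod 2 ((t.drop v.toNat).count '_') 1000000007 - 1) % 1000000007 = _
        rw [show PySem.Int.powMod 2 ((t.drop v.toNat).count '_') 1000000007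
            = (2 : Int) ^ ((t.drop v.toNat).count '_') % 1000000007 from by
          rw [PySem.Int.powMod, PySem.Int.mod_eq_emod_of_pos (by norm_num)]]
        generalize (2 : Int) ^ ((t.drop v.toNat).count '_') = p
        omega
      have hrc := (eSt_rc_k t).1
      rw [rcS] at hrc
      simp only [eStep, hx, ite_false]
      have hgoal := hsum
      omega

-- ===== VERDICT (by name: the statement is the Claim_ definition above) =====
theorem count_crying_emoticons_spec : Claim_equal_count_crying_emoticons := by
  intro message _
  unfold Spec_count_crying_emoticons count_crying_emoticons count_crying_emoticons_alt
  by_cases h : PySem.Str.find message ";" = -1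
  · have h' : PySem.Chars.find message.toList [';'] = -1 := by simpa using h
    simp [h']
  · simp only [h, ite_false]
    have hi : 0 ≤ PySem.Str.find message ";" := by
      have := PySem.Chars.neg_one_le_find message.toList (";" : String).toList
      rw [PySem.Str.find_eq] at h ⊢
      omega
    rw [PySem.List.slice_from _ hi, builder]
    simp only [PySem.List.len_eq]
    rw [PySem.List.foldl_pyRange_pyGetD' message.toList ' ' aStep ((0:Int), (0:Int), (0:Int)) hi]
    rw [show ((0:Int), (0:Int), (0:Int)) = ((0:Int) % 1000000007, (0:Int) % 1000000007, (0:Int))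
      from by norm_num]
    rw [foldA]
    rw [mainB]
    rfl
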